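-- pv_equiv track=rewrite | github.com/pypi-data/pypi-mirror-234 | packages/market-break/market-break-0.0.3.tar.gz/market-break-0.0.3/market_break/experiment.py | buy_sell_signals
-- ===== SOURCE A (Python) =====
-- from typing import Iterable, List, Tuple, Optional, Sequence
--
-- def buy_sell_signals(
--         data: Sequence[float], up: Sequence[int], down: Sequence[int]
-- ) -> Tuple[List[int], List[int]]:
--     """
--     Calculates the buy and sell signals from the trends.
--
--     :param data: The data for the indicator.
--     :param up: The up-trends indexes.
--     :param down: The down-trends indexes.
--
--     :return: The buy and sell indexes.
--     """
--
--     buy = []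
--     sell = []
--
--     for i in range(len(data)):
--         if (i in up) and (len(buy) == len(sell)):
--             up = up[up.index(i) + 1:]
--
--             buy.append(i)
--
--         elif (i in down) and (len(buy) > len(sell)):
--             down = down[down.index(i) + 1:]
--
--             sell.append(i)
--         # end if
--     # end for
--
--     return buy, sell
-- ===== SOURCE B (Python) =====
-- def buy_sell_signals(data, up, down):
--     """Event-driven: instead of scanning every index of data and testing
--     membership, repeatedly pick the smallest eligible trend index directly."""
--     n = len(data)
--     buy = []
--     sell = []
--     pos = 0
--     while True:
--         # buy phase: smallest up-index in [pos, n)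
--         cands = [x for x in up if pos <= x < n]
--         if not cands:
--             break
--         i = min(cands)
--         buy.append(i)
--         up = up[up.index(i) + 1:]
--         pos = i + 1
--         # sell phase: smallest down-index in [pos, n)
--         cands = [x for x in down if pos <= x < n]
--         if not cands:
--             break
--         j = min(cands)
--         sell.append(j)
--         down = down[down.index(j) + 1:]
--         pos = j + 1
--     return buy, sell
-- ===== Notes on version B (the rewrite author's own statement) =====
-- stated objective: faster
-- what changed: A scans every index of data doing a membership test (and list.index/slice on a hit) per index; B is an event-driven walk that repeatedly picks the smallest eligible trend index via filter+min, alternating buy/sell phases with a moving threshold, so work scales with the trend lists instead of len(data).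
import Mathlib
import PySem

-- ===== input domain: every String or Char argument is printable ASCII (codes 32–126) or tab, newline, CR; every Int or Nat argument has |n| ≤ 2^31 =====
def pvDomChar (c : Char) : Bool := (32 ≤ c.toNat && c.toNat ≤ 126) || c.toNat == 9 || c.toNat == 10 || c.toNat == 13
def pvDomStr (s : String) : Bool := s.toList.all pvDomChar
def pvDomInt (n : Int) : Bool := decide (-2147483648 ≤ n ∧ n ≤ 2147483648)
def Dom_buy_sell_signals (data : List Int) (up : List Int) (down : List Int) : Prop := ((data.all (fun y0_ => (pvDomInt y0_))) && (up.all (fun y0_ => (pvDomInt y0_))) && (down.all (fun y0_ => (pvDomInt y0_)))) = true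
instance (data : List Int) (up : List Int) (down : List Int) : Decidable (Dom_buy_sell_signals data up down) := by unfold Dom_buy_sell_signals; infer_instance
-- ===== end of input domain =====

-- B replaces A's scan over every data index (with a membership test per index) by an
-- event-driven walk that repeatedly picks the smallest eligible trend index directly;
-- objective: faster when len(data) is much larger than the number of trend indices.

-- ===== PORT A =====
-- Python `xs[xs.index(i)+1:]` (used by both A and B): drop everything up to and
-- including the FIRST occurrence of i.
def pvTrunc (xs : List Int) (i : Int) : List Int :=
  match PySem.List.index? xs i with
  | some k => PySem.List.slice xs (some ((k : Int) + 1)) none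
  | none => xs

-- the body of A's `for i in range(len(data))` loop, on state (buy, sell, up, down)
def pvStepA (st : List Int × List Int × List Int × List Int) (i : Int) :
    List Int × List Int × List Int × List Int :=
  if i ∈ st.2.2.1 ∧ st.1.length = st.2.1.length then
    (st.1 ++ [i], st.2.1, pvTrunc st.2.2.1 i, st.2.2.2)
  else if i ∈ st.2.2.2 ∧ st.2.1.length < st.1.length then
    (st.1, st.2.1 ++ [i], st.2.2.1, pvTrunc st.2.2.2 i)
  else st

def buy_sell_signals (data : List Int) (up : List Int) (down : List Int) :
    List Int × List Int :=
  let r := (PySem.List.pyRange 0 (data.length : Int)).foldl pvStepA ([], [], up, down)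
  (r.1, r.2.1)

-- ===== PORT B =====
-- B's `while True` loop; fuel is only a totality guard (data.length + 1 rounds always suffice,
-- since pos strictly increases each round and stays ≤ data.length)
def pvAltGo (n : Int) (fuel : Nat) (up down : List Int) (pos : Int)
    (buy sell : List Int) : List Int × List Int :=
  match fuel with
  | 0 => (buy, sell)
  | fuel + 1 =>
    -- buy phase: `cands = [x for x in up if pos <= x < n]`; break if empty, else min
    match PySem.List.min? (up.filter (fun x => decide (pos ≤ x) && decide (x < n))) id with
    | none => (buy, sell)
    | some i =>
      -- sell phase with pos = i + 1
      match PySem.List.min? (down.filter (fun x => decide (i + 1 ≤ x) && decide (x < n))) id with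
      | none => (buy ++ [i], sell)
      | some j =>
        pvAltGo n fuel (pvTrunc up i) (pvTrunc down j) (j + 1) (buy ++ [i]) (sell ++ [j])

def buy_sell_signals_alt (data : List Int) (up : List Int) (down : List Int) :
    List Int × List Int :=
  pvAltGo (data.length : Int) (data.length + 1) up down 0 [] []

-- ===== PRECONDITION & SPEC =====
def Spec_buy_sell_signals (data : List Int) (up : List Int) (down : List Int) (out : List Int × List Int) : Prop := out = buy_sell_signals_alt data up down
instance (data : List Int) (up : List Int) (down : List Int) (out : List Int × List Int) : Decidable (Spec_buy_sell_signals data up down out) := by unfold Spec_buy_sell_signals; infer_instance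

-- ===== CLAIM (what is proved, stated in full; the proofs are below) =====
def Claim_equal_buy_sell_signals : Prop := ∀ (data : List Int) (up : List Int) (down : List Int), Dom_buy_sell_signals data up down → Spec_buy_sell_signals data up down (buy_sell_signals data up down)

-- ===== LEMMAS AND PROOFS =====

lemma pvRange_nil {a b : Int} (h : b ≤ a) : PySem.List.pyRange a b = [] := by
  rw [List.eq_nil_iff_forall_not_mem]
  intro x hx
  rw [PySem.List.mem_pyRange_one] at hx
  omega

lemma pvStepA_skip_buy {buy sell u d : List Int} {i : Int}
    (hlen : buy.length = sell.length) (hi : i ∉ u) :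
    pvStepA (buy, sell, u, d) i = (buy, sell, u, d) := by
  simp [pvStepA, hi, hlen]

lemma pvStepA_skip_sell {buy sell u d : List Int} {i : Int}
    (hlen : sell.length < buy.length) (hi : i ∉ d) :
    pvStepA (buy, sell, u, d) i = (buy, sell, u, d) := by
  simp [pvStepA, hi, hlen.ne']

lemma pvStepA_fire_buy {buy sell u d : List Int} {i : Int}
    (hlen : buy.length = sell.length) (hi : i ∈ u) :
    pvStepA (buy, sell, u, d) i = (buy ++ [i], sell, pvTrunc u i, d) := by
  simp [pvStepA, hi, hlen]

lemma pvStepA_fire_sell {buy sell u d : List Int} {i : Int}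
    (hlen : sell.length < buy.length) (hi : i ∈ d) :
    pvStepA (buy, sell, u, d) i = (buy, sell ++ [i], u, pvTrunc d i) := by
  simp [pvStepA, hi, hlen, hlen.ne']

-- the fold over [a, b) does nothing while no up-index lies in [a, m), buy-mode
lemma pvSkip_buy {b : Int} {u d buy sell : List Int} (hlen : buy.length = sell.length) :
    ∀ (k : Nat) (a m : Int), (m - a).toNat = k → a ≤ m → m ≤ b →
    (∀ x ∈ u, ¬(a ≤ x ∧ x < m)) →
    (PySem.List.pyRange a b).foldl pvStepA (buy, sell, u, d)
      = (PySem.List.pyRange m b).foldl pvStepA (buy, sell, u, d) := by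
  intro k
  induction k with
  | zero =>
    intro a m hk ham hmb _
    have : a = m := by omega
    rw [this]
  | succ k ih =>
    intro a m hk ham hmb hno
    have ham' : a < m := by omega
    rw [PySem.List.pyRange_one_cons (by omega : a < b), List.foldl_cons,
      pvStepA_skip_buy hlen (fun h => hno a h (by omega))]
    exact ih (a + 1) m (by omega) (by omega) hmb (fun x hx ⟨h1, h2⟩ => hno x hx ⟨by omega, h2⟩)

lemma pvSkip_sell {b : Int} {u d buy sell : List Int} (hlen : sell.length < buy.length) :
    ∀ (k : Nat) (a m : Int), (m - a).toNat = k → a ≤ m → m ≤ b →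
    (∀ x ∈ d, ¬(a ≤ x ∧ x < m)) →
    (PySem.List.pyRange a b).foldl pvStepA (buy, sell, u, d)
      = (PySem.List.pyRange m b).foldl pvStepA (buy, sell, u, d) := by
  intro k
  induction k with
  | zero =>
    intro a m hk ham hmb _
    have : a = m := by omega
    rw [this]
  | succ k ih =>
    intro a m hk ham hmb hno
    rw [PySem.List.pyRange_one_cons (by omega : a < b), List.foldl_cons,
      pvStepA_skip_sell hlen (fun h => hno a h (by omega))]
    exact ih (a + 1) m (by omega) (by omega) hmb (fun x hx ⟨h1, h2⟩ => hno x hx ⟨by omega, h2⟩)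

lemma pvMain (n : Int) :
    ∀ (fuel : Nat) (pos : Int) (u d buy sell : List Int),
    pos ≤ n → (n - pos).toNat < fuel → buy.length = sell.length →
    (((PySem.List.pyRange pos n).foldl pvStepA (buy, sell, u, d)).1,
      ((PySem.List.pyRange pos n).foldl pvStepA (buy, sell, u, d)).2.1)
      = pvAltGo n fuel u d pos buy sell := by
  intro fuel
  induction fuel with
  | zero => intro pos u d buy sell _ hf _; omega
  | succ fuel ih =>
    intro pos u d buy sell hpos hf hlen
    rcases hmin : PySem.List.min? (u.filter (fun x => decide (pos ≤ x) && decide (x < n))) id with _ | i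
    · -- no up candidate: nothing fires for the rest of the scan
      have hfil := (PySem.List.min?_eq_none_iff _ _).mp hmin
      have hno : ∀ x ∈ u, ¬(pos ≤ x ∧ x < n) := by
        intro x hx hc
        have hm : x ∈ u.filter (fun x => decide (pos ≤ x) && decide (x < n)) := by
          simp [List.mem_filter, hx]; omega
        rw [hfil] at hm
        simp at hm
      rw [pvSkip_buy hlen (n - pos).toNat pos n rfl hpos le_rfl hno, pvRange_nil le_rfl]
      simp only [pvAltGo, hmin]
      rfl
    · have hmem := PySem.List.min?_mem hmin
      have hmini := PySem.List.min?_isMin hmin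
      simp only [List.mem_filter, Bool.and_eq_true, decide_eq_true_eq] at hmem
      obtain ⟨hiu, hpi, hin⟩ := hmem
      have hskip : ∀ x ∈ u, ¬(pos ≤ x ∧ x < i) := by
        intro x hx hc
        have : i ≤ id x := hmini x (by simp [List.mem_filter, hx]; omega)
        simp at this; omega
      rw [pvSkip_buy hlen (i - pos).toNat pos i rfl hpi (by omega) hskip,
        PySem.List.pyRange_one_cons (by omega : i < n), List.foldl_cons,
        pvStepA_fire_buy hlen hiu]
      have hlen' : sell.length < (buy ++ [i]).length := by simp; omega
      rcases hmin2 : PySem.List.min? (d.filter (fun x => decide (i + 1 ≤ x) && decide (x < n))) id with _ | j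
      · have hfil2 := (PySem.List.min?_eq_none_iff _ _).mp hmin2
        have hno : ∀ x ∈ d, ¬(i + 1 ≤ x ∧ x < n) := by
          intro x hx hc
          have hm : x ∈ d.filter (fun x => decide (i + 1 ≤ x) && decide (x < n)) := by
            simp [List.mem_filter, hx]; omega
          rw [hfil2] at hm
          simp at hm
        rw [pvSkip_sell hlen' (n - (i + 1)).toNat (i + 1) n rfl (by omega) le_rfl hno,
          pvRange_nil le_rfl]
        simp only [pvAltGo, hmin, hmin2]
        rfl
      · have hmem2 := PySem.List.min?_mem hmin2
        have hminj := PySem.List.min?_isMin hmin2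
        simp only [List.mem_filter, Bool.and_eq_true, decide_eq_true_eq] at hmem2
        obtain ⟨hjd, hpj, hjn⟩ := hmem2
        have hskip2 : ∀ x ∈ d, ¬(i + 1 ≤ x ∧ x < j) := by
          intro x hx hc
          have : j ≤ id x := hminj x (by simp [List.mem_filter, hx]; omega)
          simp at this; omega
        rw [pvSkip_sell hlen' (j - (i + 1)).toNat (i + 1) j rfl hpj (by omega) hskip2,
          PySem.List.pyRange_one_cons (by omega : j < n), List.foldl_cons,
          pvStepA_fire_sell hlen' hjd]
        simp only [pvAltGo, hmin, hmin2]
        exact ih (j + 1) (pvTrunc u i) (pvTrunc d j) (buy ++ [i]) (sell ++ [j])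
          (by omega) (by omega) (by simp; omega)

-- ===== VERDICT (by name: the statement is the Claim_ definition above) =====
theorem buy_sell_signals_spec : Claim_equal_buy_sell_signals := by
  intro data up down _
  unfold Spec_buy_sell_signals buy_sell_signals buy_sell_signals_alt
  exact pvMain (data.length : Int) (data.length + 1) 0 up down [] []
    (by omega) (by omega) rfl
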